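-- pv_equiv track=rewrite | github.com/bionhen/Space-project | draw_constructor.py | recognise_modules
-- ===== SOURCE A (Python) =====
-- def recognise_modules(useless, mouse_xx, mouse_yy, click_arg):
--     """
--     Эта функция должна определять, на какую кнопку нажал игрок
--     :param useless: значение переменной draw_screen
--     :param mouse_xx: горизонтальная координата точки, в которой произошел щелчок мыши
--     :param mouse_yy: вертикальная координата точки, в которой произошел щелчок мыши
--     :param click_arg: набор параметров, определяющих четность нажатия кнопки модуля
--     :return: click
--     """
--     if (625 <= mouse_xx <= 775) and (75 <= mouse_yy <= 125) and useless == "constructor":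
--         click_arg[0] = -1 * click_arg[0]
--         for i in 1, 2, 3, 4:
--             click_arg[i] = -1
--     elif (625 <= mouse_xx <= 775) and (150 <= mouse_yy <= 200) and useless == "constructor":
--         click_arg[1] = -1 * click_arg[1]
--         for i in 0, 2, 3, 4:
--             click_arg[i] = -1
--     elif (625 <= mouse_xx <= 775) and (225 <= mouse_yy <= 275) and useless == "constructor":
--         click_arg[2] = -1 * click_arg[2]
--         for i in 0, 1, 3, 4:
--             click_arg[i] = -1
--     elif (625 <= mouse_xx <= 775) and (300 <= mouse_yy <= 350) and useless == "constructor":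
--         click_arg[3] = -1 * click_arg[3]
--         for i in 0, 1, 2, 4:
--             click_arg[i] = -1
--     elif (625 <= mouse_xx <= 775) and (375 <= mouse_yy <= 425) and useless == "constructor":
--         click_arg[4] = -1 * click_arg[4]
--         for i in 0, 1, 2, 3:
--             click_arg[i] = -1
--     else:
--         pass
--     return click_arg
-- ===== SOURCE B (Python) =====
-- def recognise_modules(useless, mouse_xx, mouse_yy, click_arg):
--     if useless == "constructor" and 625 <= mouse_xx <= 775 and 75 <= mouse_yy <= 425:
--         i, r = divmod(mouse_yy - 75, 75)
--         if r <= 50: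
--             click_arg[:5] = [-click_arg[j] if j == i else -1 for j in range(5)]
--     return click_arg
-- ===== Notes on version B (the rewrite author's own statement) =====
-- stated objective: simpler
-- what changed: Replaces A's five hard-coded elif band branches by one closed-form divmod computation of the button index ((mouse_yy-75)//75 with remainder <= 50 as the hit test) and a single comprehension building the five new entries; no branch chain or band search remains. Pre_ excludes only inputs where A raises IndexError (a button hit with fewer than 5 list entries).
-- outside the precondition, e.g. on recognise_modules('constructor', 700, 100, [3, 1]): A raises IndexError, B returns [-3, -1, -1, -1, -1]
import Mathlib
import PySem

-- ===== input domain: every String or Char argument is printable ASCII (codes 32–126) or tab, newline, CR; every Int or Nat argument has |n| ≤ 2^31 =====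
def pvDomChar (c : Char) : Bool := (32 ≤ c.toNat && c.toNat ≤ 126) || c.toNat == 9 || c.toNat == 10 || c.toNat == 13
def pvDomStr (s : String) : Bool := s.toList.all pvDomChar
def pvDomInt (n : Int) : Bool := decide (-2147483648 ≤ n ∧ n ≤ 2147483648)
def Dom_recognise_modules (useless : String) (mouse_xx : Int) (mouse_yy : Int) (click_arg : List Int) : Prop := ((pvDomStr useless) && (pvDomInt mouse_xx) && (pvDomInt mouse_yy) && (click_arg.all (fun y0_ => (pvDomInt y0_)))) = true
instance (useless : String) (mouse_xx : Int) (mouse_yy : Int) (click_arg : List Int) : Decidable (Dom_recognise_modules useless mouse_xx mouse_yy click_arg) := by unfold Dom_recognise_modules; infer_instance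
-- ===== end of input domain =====

-- B replaces A's five hard-coded elif band branches by one closed-form divmod computation of the
-- button index and a single comprehension ('simpler', same cost). Both Pythons mutate click_arg in
-- place; the equivalence proved is about the RETURN value (B performs the same visible mutation on Pre_).

-- ===== PORT A =====
-- A: five elif branches; click_arg[j] = -1*click_arg[j] then a for-loop setting the other four
-- indices to -1.  pySetD/pyGetD are exact here because Pre_ guarantees the indices are in range
-- whenever a branch fires.
def recognise_modules (useless : String) (mouse_xx : Int) (mouse_yy : Int) (click_arg : List Int) : List Int :=
  if 625 ≤ mouse_xx ∧ mouse_xx ≤ 775 ∧ 75 ≤ mouse_yy ∧ mouse_yy ≤ 125 ∧ useless = "constructor" then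
    let c := PySem.List.pySetD click_arg 0 (-1 * PySem.List.pyGetD click_arg 0 0)
    ([1, 2, 3, 4] : List Int).foldl (fun c i => PySem.List.pySetD c i (-1)) c
  else if 625 ≤ mouse_xx ∧ mouse_xx ≤ 775 ∧ 150 ≤ mouse_yy ∧ mouse_yy ≤ 200 ∧ useless = "constructor" then
    let c := PySem.List.pySetD click_arg 1 (-1 * PySem.List.pyGetD click_arg 1 0)
    ([0, 2, 3, 4] : List Int).foldl (fun c i => PySem.List.pySetD c i (-1)) c
  else if 625 ≤ mouse_xx ∧ mouse_xx ≤ 775 ∧ 225 ≤ mouse_yy ∧ mouse_yy ≤ 275 ∧ useless = "constructor" then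
    let c := PySem.List.pySetD click_arg 2 (-1 * PySem.List.pyGetD click_arg 2 0)
    ([0, 1, 3, 4] : List Int).foldl (fun c i => PySem.List.pySetD c i (-1)) c
  else if 625 ≤ mouse_xx ∧ mouse_xx ≤ 775 ∧ 300 ≤ mouse_yy ∧ mouse_yy ≤ 350 ∧ useless = "constructor" then
    let c := PySem.List.pySetD click_arg 3 (-1 * PySem.List.pyGetD click_arg 3 0)
    ([0, 1, 2, 4] : List Int).foldl (fun c i => PySem.List.pySetD c i (-1)) c
  else if 625 ≤ mouse_xx ∧ mouse_xx ≤ 775 ∧ 375 ≤ mouse_yy ∧ mouse_yy ≤ 425 ∧ useless = "constructor" then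
    let c := PySem.List.pySetD click_arg 4 (-1 * PySem.List.pyGetD click_arg 4 0)
    ([0, 1, 2, 3] : List Int).foldl (fun c i => PySem.List.pySetD c i (-1)) c
  else
    click_arg

-- ===== PORT B =====
-- B: i, r = divmod(mouse_yy - 75, 75); on r <= 50 the slice assignment
-- click_arg[:5] = [-click_arg[j] if j == i else -1 for j in range(5)] — exactly the
-- comprehension's five entries followed by the untouched tail click_arg.drop 5.
def recognise_modules_alt (useless : String) (mouse_xx : Int) (mouse_yy : Int) (click_arg : List Int) : List Int :=
  if useless = "constructor" ∧ 625 ≤ mouse_xx ∧ mouse_xx ≤ 775 ∧ 75 ≤ mouse_yy ∧ mouse_yy ≤ 425 then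
    -- i, r = divmod(mouse_yy - 75, 75)
    if PySem.Int.mod (mouse_yy - 75) 75 ≤ 50 then
      (List.range 5).map (fun j =>
          if (j : Int) = PySem.Int.floordiv (mouse_yy - 75) 75
          then -(PySem.List.pyGetD click_arg (j : Int) 0) else -1)
        ++ click_arg.drop 5
    else click_arg
  else click_arg

-- ===== PRECONDITION & SPEC =====
-- Pre_ excludes exactly the inputs on which A raises IndexError: a click inside one of the five
-- button bands (with useless = "constructor") while click_arg has fewer than 5 elements.
def Pre_recognise_modules (useless : String) (mouse_xx : Int) (mouse_yy : Int) (click_arg : List Int) : Prop :=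
  (useless = "constructor" ∧ 625 ≤ mouse_xx ∧ mouse_xx ≤ 775 ∧
    ((75 ≤ mouse_yy ∧ mouse_yy ≤ 125) ∨ (150 ≤ mouse_yy ∧ mouse_yy ≤ 200) ∨
     (225 ≤ mouse_yy ∧ mouse_yy ≤ 275) ∨ (300 ≤ mouse_yy ∧ mouse_yy ≤ 350) ∨
     (375 ≤ mouse_yy ∧ mouse_yy ≤ 425))) → 5 ≤ click_arg.length
instance (useless : String) (mouse_xx : Int) (mouse_yy : Int) (click_arg : List Int) : Decidable (Pre_recognise_modules useless mouse_xx mouse_yy click_arg) := by unfold Pre_recognise_modules; infer_instance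

def pvWitness_recognise_modules : String × Int × Int × List Int := ("constructor", 700, 100, [3, 1, 4, 1, 5])

def Spec_recognise_modules (useless : String) (mouse_xx : Int) (mouse_yy : Int) (click_arg : List Int) (out : List Int) : Prop := out = recognise_modules_alt useless mouse_xx mouse_yy click_arg
instance (useless : String) (mouse_xx : Int) (mouse_yy : Int) (click_arg : List Int) (out : List Int) : Decidable (Spec_recognise_modules useless mouse_xx mouse_yy click_arg out) := by unfold Spec_recognise_modules; infer_instance

-- ===== CLAIM =====
def Claim_equal_recognise_modules : Prop := ∀ (useless : String) (mouse_xx : Int) (mouse_yy : Int) (click_arg : List Int), Dom_recognise_modules useless mouse_xx mouse_yy click_arg → Pre_recognise_modules useless mouse_xx mouse_yy click_arg → Spec_recognise_modules useless mouse_xx mouse_yy click_arg (recognise_modules useless mouse_xx mouse_yy click_arg)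

-- ===== LEMMAS AND PROOFS =====

-- On band k (75+75k ≤ y ≤ 125+75k), B's divmod index is k and the remainder test passes.
theorem alt_floordiv_band (y : Int) (k : ℤ) (h1 : 75 + 75 * k ≤ y) (h2 : y ≤ 125 + 75 * k) :
    PySem.Int.floordiv (y - 75) 75 = k ∧ PySem.Int.mod (y - 75) 75 ≤ 50 := by
  have hd : PySem.Int.floordiv (y - 75) 75 = k :=
    (PySem.Int.floordiv_eq_iff_of_pos (by omega)).2 (by constructor <;> nlinarith)
  refine ⟨hd, ?_⟩
  have := PySem.Int.floordiv_mul_add_mod (y - 75) 75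
  rw [hd] at this
  omega

-- Between bands or below/above them, B's remainder test fails (or the outer bound fails).
theorem alt_mod_miss (y : Int) (h0 : 75 ≤ y) (h5 : y ≤ 425)
    (hny : ¬((75 ≤ y ∧ y ≤ 125) ∨ (150 ≤ y ∧ y ≤ 200) ∨ (225 ≤ y ∧ y ≤ 275) ∨
        (300 ≤ y ∧ y ≤ 350) ∨ (375 ≤ y ∧ y ≤ 425))) :
    ¬ PySem.Int.mod (y - 75) 75 ≤ 50 := by
  have hq : PySem.Int.floordiv (y - 75) 75 * 75 + PySem.Int.mod (y - 75) 75 = y - 75 :=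
    PySem.Int.floordiv_mul_add_mod (y - 75) 75
  have hm0 : 0 ≤ PySem.Int.mod (y - 75) 75 := by
    have := PySem.Int.mod_eq_emod_of_pos (a := y - 75) (b := 75) (by omega)
    omega
  have hm75 : PySem.Int.mod (y - 75) 75 < 75 := by
    have := PySem.Int.mod_eq_emod_of_pos (a := y - 75) (b := 75) (by omega)
    omega
  intro hle
  set q := PySem.Int.floordiv (y - 75) 75 with hqdef
  have hq0 : 0 ≤ q := by nlinarith
  have hq4 : q ≤ 4 := by nlinarith
  interval_cases q <;> (apply hny; omega)

-- ===== VERDICT =====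
set_option maxHeartbeats 2000000 in
theorem recognise_modules_spec : Claim_equal_recognise_modules := by
  intro useless x y c _ hpre
  unfold Spec_recognise_modules
  by_cases hhit : useless = "constructor" ∧ 625 ≤ x ∧ x ≤ 775 ∧
      ((75 ≤ y ∧ y ≤ 125) ∨ (150 ≤ y ∧ y ≤ 200) ∨ (225 ≤ y ∧ y ≤ 275) ∨
       (300 ≤ y ∧ y ≤ 350) ∨ (375 ≤ y ∧ y ≤ 425))
  · obtain ⟨hu, hx1, hx2, hy⟩ := hhit
    have hlen : 5 ≤ c.length := hpre ⟨hu, hx1, hx2, hy⟩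
    match c, hlen with
    | a0 :: a1 :: a2 :: a3 :: a4 :: t, _ =>
      unfold recognise_modules recognise_modules_alt
      rcases hy with h | h | h | h | h
      · obtain ⟨hd, hr⟩ := alt_floordiv_band y 0 (by omega) (by omega)
        rw [if_pos ⟨hx1, hx2, h.1, h.2, hu⟩,
            if_pos ⟨hu, hx1, hx2, by omega, by omega⟩, if_pos hr]
        simp only [hd]
        simp only [List.range_succ, List.range_zero, List.foldl_cons, List.foldl_nil]
        norm_num [PySem.List.pySetD_of_nonneg, PySem.List.pyGetD_of_nonneg, List.set,
          show Int.toNat 0 = 0 from rfl, show Int.toNat 1 = 1 from rfl,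
          show Int.toNat 2 = 2 from rfl, show Int.toNat 3 = 3 from rfl,
          show Int.toNat 4 = 4 from rfl]
      · obtain ⟨hd, hr⟩ := alt_floordiv_band y 1 (by omega) (by omega)
        rw [if_neg (by rintro ⟨_, _, p, q, _⟩; omega), if_pos ⟨hx1, hx2, h.1, h.2, hu⟩,
            if_pos ⟨hu, hx1, hx2, by omega, by omega⟩, if_pos hr]
        simp only [hd]
        simp only [List.range_succ, List.range_zero, List.foldl_cons, List.foldl_nil]
        norm_num [PySem.List.pySetD_of_nonneg, PySem.List.pyGetD_of_nonneg, List.set,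
          show Int.toNat 0 = 0 from rfl, show Int.toNat 1 = 1 from rfl,
          show Int.toNat 2 = 2 from rfl, show Int.toNat 3 = 3 from rfl,
          show Int.toNat 4 = 4 from rfl]
      · obtain ⟨hd, hr⟩ := alt_floordiv_band y 2 (by omega) (by omega)
        rw [if_neg (by rintro ⟨_, _, p, q, _⟩; omega), if_neg (by rintro ⟨_, _, p, q, _⟩; omega),
            if_pos ⟨hx1, hx2, h.1, h.2, hu⟩,
            if_pos ⟨hu, hx1, hx2, by omega, by omega⟩, if_pos hr]
        simp only [hd]
        simp only [List.range_succ, List.range_zero, List.foldl_cons, List.foldl_nil]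
        norm_num [PySem.List.pySetD_of_nonneg, PySem.List.pyGetD_of_nonneg, List.set,
          show Int.toNat 0 = 0 from rfl, show Int.toNat 1 = 1 from rfl,
          show Int.toNat 2 = 2 from rfl, show Int.toNat 3 = 3 from rfl,
          show Int.toNat 4 = 4 from rfl]
      · obtain ⟨hd, hr⟩ := alt_floordiv_band y 3 (by omega) (by omega)
        rw [if_neg (by rintro ⟨_, _, p, q, _⟩; omega), if_neg (by rintro ⟨_, _, p, q, _⟩; omega),
            if_neg (by rintro ⟨_, _, p, q, _⟩; omega),
            if_pos ⟨hx1, hx2, h.1, h.2, hu⟩,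
            if_pos ⟨hu, hx1, hx2, by omega, by omega⟩, if_pos hr]
        simp only [hd]
        simp only [List.range_succ, List.range_zero, List.foldl_cons, List.foldl_nil]
        norm_num [PySem.List.pySetD_of_nonneg, PySem.List.pyGetD_of_nonneg, List.set,
          show Int.toNat 0 = 0 from rfl, show Int.toNat 1 = 1 from rfl,
          show Int.toNat 2 = 2 from rfl, show Int.toNat 3 = 3 from rfl,
          show Int.toNat 4 = 4 from rfl]
      · obtain ⟨hd, hr⟩ := alt_floordiv_band y 4 (by omega) (by omega)
        rw [if_neg (by rintro ⟨_, _, p, q, _⟩; omega), if_neg (by rintro ⟨_, _, p, q, _⟩; omega),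
            if_neg (by rintro ⟨_, _, p, q, _⟩; omega), if_neg (by rintro ⟨_, _, p, q, _⟩; omega),
            if_pos ⟨hx1, hx2, h.1, h.2, hu⟩,
            if_pos ⟨hu, hx1, hx2, by omega, by omega⟩, if_pos hr]
        simp only [hd]
        simp only [List.range_succ, List.range_zero, List.foldl_cons, List.foldl_nil]
        norm_num [PySem.List.pySetD_of_nonneg, PySem.List.pyGetD_of_nonneg, List.set,
          show Int.toNat 0 = 0 from rfl, show Int.toNat 1 = 1 from rfl,
          show Int.toNat 2 = 2 from rfl, show Int.toNat 3 = 3 from rfl,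
          show Int.toNat 4 = 4 from rfl]
  · have hAn : recognise_modules useless x y c = c := by
      unfold recognise_modules
      rw [if_neg (by rintro ⟨p1, p2, p3, p4, p5⟩; exact hhit ⟨p5, p1, p2, Or.inl ⟨p3, p4⟩⟩),
          if_neg (by rintro ⟨p1, p2, p3, p4, p5⟩; exact hhit ⟨p5, p1, p2, Or.inr (Or.inl ⟨p3, p4⟩)⟩),
          if_neg (by rintro ⟨p1, p2, p3, p4, p5⟩; exact hhit ⟨p5, p1, p2, Or.inr (Or.inr (Or.inl ⟨p3, p4⟩))⟩),
          if_neg (by rintro ⟨p1, p2, p3, p4, p5⟩; exact hhit ⟨p5, p1, p2, Or.inr (Or.inr (Or.inr (Or.inl ⟨p3, p4⟩)))⟩),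
          if_neg (by rintro ⟨p1, p2, p3, p4, p5⟩; exact hhit ⟨p5, p1, p2, Or.inr (Or.inr (Or.inr (Or.inr ⟨p3, p4⟩)))⟩)]
    rw [hAn]
    unfold recognise_modules_alt
    by_cases hout : useless = "constructor" ∧ 625 ≤ x ∧ x ≤ 775 ∧ 75 ≤ y ∧ y ≤ 425
    · have hny : ¬((75 ≤ y ∧ y ≤ 125) ∨ (150 ≤ y ∧ y ≤ 200) ∨ (225 ≤ y ∧ y ≤ 275) ∨
          (300 ≤ y ∧ y ≤ 350) ∨ (375 ≤ y ∧ y ≤ 425)) :=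
        fun hy => hhit ⟨hout.1, hout.2.1, hout.2.2.1, hy⟩
      rw [if_pos hout, if_neg (alt_mod_miss y hout.2.2.2.1 hout.2.2.2.2 hny)]
    · rw [if_neg hout]
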